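-- pv_equiv track=rewrite | github.com/EITLabworks/ML-based-Estimation-of-Aortic-Pressure-Curves-by-EIT | src/cauchy_lorentz.py | sort_cl_pulses
-- ===== SOURCE A (Python) =====
-- def sort_cl_pulses(pos, sigma, amp, dk):
--     paired_data = list(zip(pos, sigma, amp, dk))
--     sorted_data = sorted(paired_data, key=lambda x: x[0])
--     pos_new = [element[0] for element in sorted_data]
--     sigma_new = [element[1] for element in sorted_data]
--     amp_new = [element[2] for element in sorted_data]
--     dk_new = [element[3] for element in sorted_data]
--     return pos_new, sigma_new, amp_new, dk_new
-- ===== SOURCE B (Python) =====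
-- def sort_cl_pulses(pos, sigma, amp, dk):
--     # Online stable insertion sort: take rows in input order and insert each
--     # into four parallel, already-sorted output lists (scan from the right to
--     # keep equal-pos rows in input order).  No tuple sort, no unzip.
--     pos_new, sigma_new, amp_new, dk_new = [], [], [], []
--     for p, s, a, d in zip(pos, sigma, amp, dk):
--         i = len(pos_new)
--         while i > 0 and pos_new[i - 1] > p:
--             i -= 1
--         pos_new.insert(i, p)
--         sigma_new.insert(i, s)
--         amp_new.insert(i, a)
--         dk_new.insert(i, d)
--     return pos_new, sigma_new, amp_new, dk_new
-- ===== Notes on version B (the rewrite author's own statement) =====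
-- stated objective: alternative
-- what changed: B replaces zip-into-tuples / library sort / unzip by an online stable insertion sort that maintains four parallel sorted output lists and inserts each incoming row at the position found by a right-to-left scan.
import Mathlib
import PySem

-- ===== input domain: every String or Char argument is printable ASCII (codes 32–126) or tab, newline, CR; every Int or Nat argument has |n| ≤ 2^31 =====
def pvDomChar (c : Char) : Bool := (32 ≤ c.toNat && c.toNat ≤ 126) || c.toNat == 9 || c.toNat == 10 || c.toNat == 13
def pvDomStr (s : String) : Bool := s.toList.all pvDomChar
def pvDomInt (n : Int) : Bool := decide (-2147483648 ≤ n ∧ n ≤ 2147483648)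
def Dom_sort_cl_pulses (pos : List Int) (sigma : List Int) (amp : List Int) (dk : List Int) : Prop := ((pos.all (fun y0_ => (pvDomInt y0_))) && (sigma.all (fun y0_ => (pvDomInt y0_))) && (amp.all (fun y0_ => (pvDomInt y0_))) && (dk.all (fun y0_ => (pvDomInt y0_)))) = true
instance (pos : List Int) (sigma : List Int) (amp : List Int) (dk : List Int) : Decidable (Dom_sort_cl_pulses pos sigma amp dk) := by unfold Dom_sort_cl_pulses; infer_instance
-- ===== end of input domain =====

-- B replaces zip/library-sort/unzip by an online stable insertion sort over four
-- parallel output lists (objective: alternative, not faster).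

-- ===== PORT A =====
def sort_cl_pulses (pos : List Int) (sigma : List Int) (amp : List Int) (dk : List Int) : List Int × List Int × List Int × List Int :=
  let paired_data := pos.zip (sigma.zip (amp.zip dk))
  let sorted_data := PySem.List.sorted paired_data (fun x => x.1) false
  let pos_new := sorted_data.map (fun e => e.1)
  let sigma_new := sorted_data.map (fun e => e.2.1)
  let amp_new := sorted_data.map (fun e => e.2.2.1)
  let dk_new := sorted_data.map (fun e => e.2.2.2)
  (pos_new, sigma_new, amp_new, dk_new)

-- ===== PORT B =====
-- the `while i > 0 and pos_new[i-1] > p: i -= 1` loop of Source B: how many steps the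
-- insertion index moves left, scanning the accumulated pos list from its right end
def pvMoveLeft : List Int → Int → Nat
  | [], _ => 0
  | x :: xs, p => if p < x then 1 + pvMoveLeft xs p else 0

-- one iteration of Source B's for loop: insert the row (p,s,a,d) into the four
-- parallel sorted lists.  The computed index i satisfies 0 ≤ i ≤ len, so
-- Python's list.insert(i, x) is exactly List.insertIdx i x.
def pvStep (st : List Int × List Int × List Int × List Int) (r : Int × Int × Int × Int) :
    List Int × List Int × List Int × List Int :=
  let i := st.1.length - pvMoveLeft st.1.reverse r.1
  (st.1.insertIdx i r.1, st.2.1.insertIdx i r.2.1,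
   st.2.2.1.insertIdx i r.2.2.1, st.2.2.2.insertIdx i r.2.2.2)

def sort_cl_pulses_alt (pos : List Int) (sigma : List Int) (amp : List Int) (dk : List Int) : List Int × List Int × List Int × List Int :=
  (pos.zip (sigma.zip (amp.zip dk))).foldl pvStep ([], [], [], [])

-- ===== PRECONDITION & SPEC =====
def Spec_sort_cl_pulses (pos : List Int) (sigma : List Int) (amp : List Int) (dk : List Int) (out : List Int × List Int × List Int × List Int) : Prop := out = sort_cl_pulses_alt pos sigma amp dk
instance (pos : List Int) (sigma : List Int) (amp : List Int) (dk : List Int) (out : List Int × List Int × List Int × List Int) : Decidable (Spec_sort_cl_pulses pos sigma amp dk out) := by unfold Spec_sort_cl_pulses; infer_instance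

-- ===== CLAIM (what is proved, stated in full; the proofs are below) =====
def Claim_equal_sort_cl_pulses : Prop := ∀ (pos : List Int) (sigma : List Int) (amp : List Int) (dk : List Int), Dom_sort_cl_pulses pos sigma amp dk → Spec_sort_cl_pulses pos sigma amp dk (sort_cl_pulses pos sigma amp dk)

-- ===== LEMMAS AND PROOFS =====

-- the four components of a row / of the state, as one "unzip" abbreviation
def pvUnzip4 (S : List (Int × Int × Int × Int)) : List Int × List Int × List Int × List Int :=
  (S.map (·.1), S.map (·.2.1), S.map (·.2.2.1), S.map (·.2.2.2))

-- insertBy inserts before the first element the comparison accepts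
theorem insertBy_eq_insertIdx {α : Type} (b : α → α → Bool) (x : α) (ys : List α) :
    PySem.List.insertBy b x ys = ys.insertIdx ((ys.takeWhile (fun y => !(b x y))).length) x := by
  induction ys with
  | nil => rfl
  | cons y ys ih =>
    simp only [PySem.List.insertBy, List.takeWhile]
    cases h : b x y <;> simp [ih, List.insertIdx]

theorem pvMoveLeft_eq_takeWhile (xs : List Int) (p : Int) :
    pvMoveLeft xs p = (xs.takeWhile (fun x => decide (p < x))).length := by
  induction xs with
  | nil => rfl
  | cons x xs ih =>
    simp only [pvMoveLeft, List.takeWhile]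
    by_cases h : p < x
    · simp [h, ih]; omega
    · simp [h]

-- on a ≤-sorted list, the right-to-left scan finds the same index as the
-- left-to-right scan of insertBy
theorem moveLeft_index (ps : List Int) (p : Int) (hs : ps.Pairwise (· ≤ ·)) :
    ps.length - pvMoveLeft ps.reverse p = (ps.takeWhile (fun y => !decide (p < y))).length := by
  rw [pvMoveLeft_eq_takeWhile]
  set Q : Int → Bool := fun y => !decide (p < y) with hQ
  have hsplit : ps = ps.takeWhile Q ++ ps.dropWhile Q := (List.takeWhile_append_dropWhile).symm
  have hdropAll : ∀ z ∈ ps.dropWhile Q, decide (p < z) = true := by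
    intro z hz
    rcases hd : ps.dropWhile Q with _ | ⟨h0, rest⟩
    · simp [hd] at hz
    · have hh0 : ¬ Q h0 = true := by
        have := List.head?_dropWhile_not Q ps
        rw [hd] at this; simpa using this
      have hph0 : p < h0 := by simpa [hQ] using hh0
      rw [hd] at hz
      rcases List.mem_cons.mp hz with rfl | hz'
      · simpa using hph0
      · -- sortedness: h0 ≤ z for z after h0
        have hp2 : (ps.dropWhile Q).Pairwise (· ≤ ·) := by
          rw [hsplit] at hs; exact (List.pairwise_append.mp hs).2.1
        rw [hd] at hp2
        have : h0 ≤ z := (List.pairwise_cons.mp hp2).1 z hz'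
        simp; omega
  have hrev : ps.reverse.takeWhile (fun x => decide (p < x)) = (ps.dropWhile Q).reverse := by
    conv_lhs => rw [hsplit]
    rw [List.reverse_append, List.takeWhile_append]
    have hall : (ps.dropWhile Q).reverse.takeWhile (fun x => decide (p < x))
        = (ps.dropWhile Q).reverse := by
      rw [List.takeWhile_eq_self_iff]
      intro z hz; exact hdropAll z (List.mem_reverse.mp hz)
    rw [if_pos (by rw [hall])]
    have : (ps.takeWhile Q).reverse.takeWhile (fun x => decide (p < x)) = [] := by
      rcases ht : (ps.takeWhile Q).reverse with _ | ⟨t0, ts⟩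
      · rfl
      · have ht0 : Q t0 = true := by
          have : t0 ∈ ps.takeWhile Q := by
            have : t0 ∈ (ps.takeWhile Q).reverse := by rw [ht]; exact List.mem_cons_self
            exact List.mem_reverse.mp this
          exact List.mem_takeWhile_imp this
        simp only [List.takeWhile]
        have : decide (p < t0) = false := by simpa [hQ] using ht0
        simp [this]
    rw [this, List.append_nil]
  rw [hrev]
  have hlen : (ps.takeWhile Q).length + (ps.dropWhile Q).length = ps.length := by
    have := congrArg List.length hsplit
    simp only [List.length_append] at this
    omega
  simp only [List.length_reverse]
  omega

-- one Source B insertion step on the unzipped state = insertBy on the row list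
theorem pvStep_unzip (S : List (Int × Int × Int × Int)) (r : Int × Int × Int × Int)
    (hs : S.Pairwise (fun a b => a.1 ≤ b.1)) :
    pvStep (pvUnzip4 S) r
      = pvUnzip4 (PySem.List.insertBy (fun a b => decide (a.1 < b.1)) r S) := by
  have hsp : (S.map (·.1)).Pairwise (· ≤ ·) := List.Pairwise.map _ (fun a b h => h) hs
  have hidx : (S.map (·.1)).length - pvMoveLeft (S.map (·.1)).reverse r.1
      = (S.takeWhile (fun y => !decide (r.1 < y.1))).length := by
    rw [moveLeft_index _ _ hsp, List.takeWhile_map, List.length_map]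
    simp [Function.comp_def]
  simp only [pvStep, pvUnzip4, hidx, insertBy_eq_insertIdx, List.map_insertIdx]

-- insertBy keyed on the first component preserves ≤-sortedness of the keys
theorem insertBy_pairwise (S : List (Int × Int × Int × Int)) (r : Int × Int × Int × Int)
    (hs : S.Pairwise (fun a b => a.1 ≤ b.1)) :
    (PySem.List.insertBy (fun a b => decide (a.1 < b.1)) r S).Pairwise (fun a b => a.1 ≤ b.1) := by
  induction S with
  | nil => simp [PySem.List.insertBy]
  | cons y ys ih =>
    rcases List.pairwise_cons.mp hs with ⟨hy, hys⟩
    simp only [PySem.List.insertBy]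
    by_cases h : r.1 < y.1
    · simp only [h, decide_true, if_true]
      refine List.pairwise_cons.mpr ⟨?_, hs⟩
      intro z hz
      rcases List.mem_cons.mp hz with rfl | hz'
      · exact le_of_lt h
      · exact le_trans (le_of_lt h) (hy z hz')
    · simp only [h, decide_false, Bool.false_eq_true, if_false]
      refine List.pairwise_cons.mpr ⟨?_, ih hys⟩
      intro z hz
      rcases (PySem.List.mem_insertBy _ _ _ _).mp hz with rfl | hz'
      · omega
      · exact hy z hz'

-- the fold invariant: Source B's loop over the rows computes the unzip of A's
-- insertion-sort fold, from any sorted intermediate state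
theorem fold_invariant (rows : List (Int × Int × Int × Int)) :
    ∀ S, S.Pairwise (fun a b => a.1 ≤ b.1) →
      rows.foldl pvStep (pvUnzip4 S)
        = pvUnzip4 (rows.foldl
            (fun acc x => PySem.List.insertBy (fun a b => decide (a.1 < b.1)) x acc) S) := by
  induction rows with
  | nil => intro S _; rfl
  | cons r rows ih =>
    intro S hs
    simp only [List.foldl_cons]
    rw [pvStep_unzip S r hs]
    exact ih _ (insertBy_pairwise S r hs)

-- ===== VERDICT (by name: the statement is the Claim_ definition above) =====
theorem sort_cl_pulses_spec : Claim_equal_sort_cl_pulses := by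
  intro pos sigma amp dk _
  unfold Spec_sort_cl_pulses sort_cl_pulses sort_cl_pulses_alt
  dsimp only
  rw [PySem.List.sorted_eq_foldl_insertBy]
  have := fold_invariant (pos.zip (sigma.zip (amp.zip dk))) [] (by simp)
  simp only [pvUnzip4, List.map_nil] at this
  rw [this]
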